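-- pv_equiv track=rewrite | github.com/jKaleba/ASD | Other/GoodBeginning.py | goodBeginning
-- ===== SOURCE A (Python) =====
-- def goodBeginning(Graph: list[list[int]]) -> bool:
--     INVALID_TIME = -1
--     n = len(Graph)
--
--     visitTime = [INVALID_TIME for _ in range(n)]
--     visited = [False for _ in range(n)]
--     time = 1
--
--     for u in range(n):
--         if not visited[u]:
--             time = DFSVisit(Graph, u, time, visitTime, visited)
--
--     maxV = visitTime.index(len(Graph))
--
--     for u in range(n):
--         visitTime[u] = INVALID_TIME
--         visited[u] = False
--
--     DFSVisit(Graph, maxV, time, visitTime, visited)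
--     for vis in visited:
--         if not vis:
--             return False
--
--     return True
--
-- def DFSVisit(Graph, u, time, visitTime, visited):
--     visited[u] = True
--     for v in Graph[u]:
--         if not visited[v]:
--             time = DFSVisit(Graph, v, time, visitTime, visited)
--
--     visitTime[u] = time
--     time += 1
--     return time
-- ===== SOURCE B (Python) =====
-- def goodBeginning(Graph: list[list[int]]) -> bool:
--     n = len(Graph)
--     for u in range(n):
--         seen = [False] * n
--         frontier = [u]
--         while frontier:
--             nxt = []
--             for x in frontier:
--                 if not seen[x]:
--                     seen[x] = True
--                     nxt.extend(Graph[x])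
--             frontier = nxt
--         if all(seen):
--             return True
--     return False
-- ===== Notes on version B (the rewrite author's own statement) =====
-- stated objective: alternative
-- what changed: B abandons the finish-time/mother-vertex DFS trick altogether: it brute-forces every start vertex, computing its reachable set by an iterative frontier (BFS-style level) expansion instead of recursive DFS, and returns whether some start reaches all vertices; the Lean file proves the classic mother-vertex theorem to connect the two.
import Mathlib
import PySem

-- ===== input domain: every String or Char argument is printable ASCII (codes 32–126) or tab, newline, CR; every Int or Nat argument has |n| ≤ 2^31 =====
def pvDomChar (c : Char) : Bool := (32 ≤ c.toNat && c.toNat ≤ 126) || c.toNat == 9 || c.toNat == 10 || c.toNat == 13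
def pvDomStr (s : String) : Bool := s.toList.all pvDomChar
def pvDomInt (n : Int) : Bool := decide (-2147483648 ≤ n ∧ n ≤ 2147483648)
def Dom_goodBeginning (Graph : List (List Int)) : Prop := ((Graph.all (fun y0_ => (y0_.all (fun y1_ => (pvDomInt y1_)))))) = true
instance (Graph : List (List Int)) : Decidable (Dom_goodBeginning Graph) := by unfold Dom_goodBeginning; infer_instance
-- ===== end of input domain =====

-- B is an 'alternative': it abandons the finish-time mother-vertex DFS trick and instead
-- brute-forces every start vertex, computing its reachable set by iterative frontier (BFS
-- level) expansion, returning whether some start reaches every vertex.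

-- ===== PORT A =====
-- DFSVisit; the fuel argument only makes the recursion total (Python recursion depth is
-- bounded by the number of unvisited vertices, so fuel n+1 at the call sites never runs out).
def dfsVisit (G : List (List Int)) : Nat → Int → Int → List Int → List Bool → Int × List Int × List Bool
  | 0, _, t, vt, vis => (t, vt, vis)
  | fuel+1, u, t, vt, vis =>
    let s := (PySem.List.pyGetD G u []).foldl
      (fun (s : Int × List Int × List Bool) v =>
        if PySem.List.pyGetD s.2.2 v true = false then
          dfsVisit G fuel v s.1 s.2.1 s.2.2
        else s)
      (t, vt, PySem.List.pySetD vis u true)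
    (s.1 + 1, PySem.List.pySetD s.2.1 u s.1, s.2.2)

-- the final 'for vis in visited: if not vis: return False / return True'
def scanA : List Bool → Bool
  | [] => true
  | b :: r => if b = false then false else scanA r

def goodBeginning (Graph : List (List Int)) : Bool :=
  let n := Graph.length
  let visitTime : List Int := (List.range n).map (fun _ => (-1 : Int))
  let visited : List Bool := (List.range n).map (fun _ => false)
  let s := (PySem.List.pyRange 0 n 1).foldl
    (fun (s : Int × List Int × List Bool) u =>
      if PySem.List.pyGetD s.2.2 u true = false then dfsVisit Graph (n+1) u s.1 s.2.1 s.2.2 else s)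
    (1, visitTime, visited)
  match PySem.List.index? s.2.1 (n : Int) with
  | none => false       -- visitTime.index raises ValueError here; excluded by Pre_
  | some maxV =>
    let vt2 := (PySem.List.pyRange 0 n 1).foldl (fun a u => PySem.List.pySetD a u (-1 : Int)) s.2.1
    let vis2 := (PySem.List.pyRange 0 n 1).foldl (fun a u => PySem.List.pySetD a u false) s.2.2
    scanA (dfsVisit Graph (n+1) (maxV : Int) s.1 vt2 vis2).2.2

-- ===== PORT B =====
-- one frontier pass: 'for x in frontier: if not seen[x]: seen[x]=True; nxt.extend(Graph[x])'
def bfsRound (G : List (List Int)) (frontier : List Int) (seen : List Bool) : List Bool × List Int :=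
  frontier.foldl
    (fun (s : List Bool × List Int) x =>
      if PySem.List.pyGetD s.1 x true = false then
        (PySem.List.pySetD s.1 x true, s.2 ++ PySem.List.pyGetD G x [])
      else s)
    (seen, [])

-- 'while frontier: …'; fuel only makes the loop total (a nonempty frontier either marks a
-- fresh vertex or produces an empty next frontier, so fuel n+1 at the call site never runs out)
def bfsLoop (G : List (List Int)) : Nat → List Int → List Bool → List Bool
  | _, [], seen => seen
  | 0, _ :: _, seen => seen
  | fuel+1, x :: f, seen =>
      let r := bfsRound G (x :: f) seen
      bfsLoop G fuel r.2 r.1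

-- 'for u in range(n): … if all(seen): return True / return False'
def bruteLoop (G : List (List Int)) : List Int → Bool
  | [] => false
  | u :: rest =>
      if (bfsLoop G (G.length + 1) [u] (List.replicate G.length false)).all (fun b => b) then
        true
      else bruteLoop G rest

def goodBeginning_alt (Graph : List (List Int)) : Bool :=
  bruteLoop Graph (PySem.List.pyRange 0 (Graph.length : Int) 1)

-- ===== PRECONDITION & SPEC =====
-- Pre_ excludes exactly the inputs where the Python A raises: the empty graph
-- (visitTime.index on [] → ValueError) and graphs with an adjacency entry outside
-- [-n, n) (visited[v] → IndexError).
def Pre_goodBeginning (Graph : List (List Int)) : Prop :=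
  Graph ≠ [] ∧ ∀ row ∈ Graph, ∀ v ∈ row, -(Graph.length : Int) ≤ v ∧ v < Graph.length

instance (Graph : List (List Int)) : Decidable (Pre_goodBeginning Graph) := by
  unfold Pre_goodBeginning; infer_instance

def pvWitness_goodBeginning : List (List Int) := [[1], [0]]

def Spec_goodBeginning (Graph : List (List Int)) (out : Bool) : Prop := out = goodBeginning_alt Graph
instance (Graph : List (List Int)) (out : Bool) : Decidable (Spec_goodBeginning Graph out) := by
  unfold Spec_goodBeginning; infer_instance

-- ===== CLAIM (what is proved, stated in full; the proofs are below) =====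
def Claim_equal_goodBeginning : Prop :=
  ∀ (Graph : List (List Int)), Dom_goodBeginning Graph → Pre_goodBeginning Graph →
    Spec_goodBeginning Graph (goodBeginning Graph)


-- ===== LEMMAS AND PROOFS =====

-- index normalization: Python's negative-index rule
def pvIdx (n : Nat) (u : Int) : Nat := if 0 ≤ u then u.toNat else n - (-u).toNat

-- number of visited vertices
def pvTC (vis : List Bool) : Nat := vis.count true

-- 'in range' for a Python index into a length-n list
def pvInR (n : Nat) (v : Int) : Prop := -(n : Int) ≤ v ∧ v < n

-- the edge relation of the graph, on normalized Nat vertices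
def pvEdge (G : List (List Int)) (i j : Nat) : Prop :=
  ∃ v ∈ G.getD i [], pvInR G.length v ∧ pvIdx G.length v = j

-- reachability
def pvReach (G : List (List Int)) : Nat → Nat → Prop := Relation.ReflTransGen (pvEdge G)

-- 'vertex i is marked in the boolean list vis'
def pvMk (vis : List Bool) (i : Nat) : Prop := vis[i]? = some true

-- recursive reachability marker (proof-only ghost: it is what A's DFSVisit does to its
-- visited array; pvTrav below relates it to dfsVisit)
def reachB (G : List (List Int)) : Nat → Int → List Bool → List Bool
  | 0, _, vis => vis
  | fuel+1, u, vis =>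
    if PySem.List.pyGetD vis u true = true then vis
    else
      (PySem.List.pyGetD G u []).foldl (fun vis v => reachB G fuel v vis)
        (PySem.List.pySetD vis u true)

theorem pvIdx_some (n : Nat) (u : Int) (h1 : -(n : Int) ≤ u) (h2 : u < n) :
    PySem.List.pyIdx? n u = some (pvIdx n u) := by
  simp only [PySem.List.pyIdx?, pvIdx]
  split_ifs <;> simp_all

theorem pvIdx_lt (n : Nat) (u : Int) (h1 : -(n : Int) ≤ u) (h2 : u < n) :
    pvIdx n u < n := by
  simp only [pvIdx]; split_ifs <;> omega

theorem pvIdx_natCast (n k : Nat) : pvIdx n ((k : Nat) : Int) = k := by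
  simp [pvIdx]

theorem pvGetD_norm {a : Type} (xs : List a) (u : Int) (d : a)
    (h1 : -(xs.length : Int) ≤ u) (h2 : u < xs.length) :
    PySem.List.pyGetD xs u d = (xs[pvIdx xs.length u]?).getD d := by
  simp [PySem.List.pyGetD, PySem.List.pyGet?, pvIdx_some _ _ h1 h2]

theorem pvSetD_norm {a : Type} (xs : List a) (u : Int) (v : a)
    (h1 : -(xs.length : Int) ≤ u) (h2 : u < xs.length) :
    PySem.List.pySetD xs u v = xs.set (pvIdx xs.length u) v := by
  simp [PySem.List.pySetD, PySem.List.pySet?, pvIdx_some _ _ h1 h2]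

-- a false guard 'not visited[u]' implies u is in range and the slot is false
theorem pvGuard (xs : List Bool) (u : Int) (h : PySem.List.pyGetD xs u true = false) :
    (-(xs.length : Int) ≤ u ∧ u < xs.length) ∧ pvIdx xs.length u < xs.length ∧
      xs[pvIdx xs.length u]? = some false := by
  have hr : -(xs.length : Int) ≤ u ∧ u < xs.length := by
    by_contra hc
    have hn : PySem.List.pyIdx? xs.length u = none := by
      simp only [PySem.List.pyIdx?]
      split_ifs with h1 h2 h3 <;> first | rfl | (exfalso; apply hc; constructor <;> omega)
    simp [PySem.List.pyGetD, PySem.List.pyGet?, hn] at h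
  have hk := pvIdx_lt _ _ hr.1 hr.2
  rw [pvGetD_norm xs u true hr.1 hr.2, List.getElem?_eq_getElem hk] at h
  refine ⟨hr, hk, ?_⟩
  rw [List.getElem?_eq_getElem hk]
  simpa using h

-- a true guard at an in-range index means the slot is marked
theorem pvGuardT (xs : List Bool) (u : Int) (h1 : -(xs.length : Int) ≤ u) (h2 : u < xs.length)
    (h : PySem.List.pyGetD xs u true = true) : pvMk xs (pvIdx xs.length u) := by
  have hk := pvIdx_lt _ _ h1 h2
  rw [pvGetD_norm xs u true h1 h2, List.getElem?_eq_getElem hk] at h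
  simp only [pvMk, List.getElem?_eq_getElem hk]
  simpa using h

theorem pvTC_set_true (xs : List Bool) (k : Nat) (h : xs[k]? = some false) :
    pvTC (xs.set k true) = pvTC xs + 1 := by
  induction xs generalizing k with
  | nil => simp at h
  | cons a l ih =>
    cases k with
    | zero => simp_all [pvTC]
    | succ k =>
      have := ih k (by simpa using h)
      simp only [pvTC, List.set_cons_succ, List.count_cons] at *
      omega

theorem pvTC_le_len (xs : List Bool) : pvTC xs ≤ xs.length := List.count_le_length

theorem pvTC_mono (a b : List Bool) (hl : a.length = b.length)
    (h : ∀ i, pvMk a i → pvMk b i) : pvTC a ≤ pvTC b := by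
  induction a generalizing b with
  | nil => simp [pvTC]
  | cons x l ih =>
    cases b with
    | nil => simp at hl
    | cons y m =>
      have hx : x = true → y = true := by
        intro hxt
        have := h 0 (by simp [pvMk, hxt])
        simpa [pvMk] using this
      have ht : pvTC l ≤ pvTC m := by
        refine ih m (by simpa using hl) ?_
        intro i hi
        have := h (i + 1) (by simpa [pvMk] using hi)
        simpa [pvMk] using this
      simp only [pvTC, List.count_cons] at *
      cases x <;> cases y <;> simp_all <;> omega

theorem pvTC_full (xs : List Bool) (h : ∀ i < xs.length, xs[i]? = some true) :
    pvTC xs = xs.length := by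
  induction xs with
  | nil => simp [pvTC]
  | cons a l ih =>
    have ha : a = true := by have := h 0 (by simp); simpa using this
    have hl : pvTC l = l.length := by
      apply ih; intro i hi; have := h (i + 1) (by simpa using hi); simpa using this
    simp_all [pvTC]

theorem pvSetD_true_mono (xs : List Bool) (u : Int) (i : Nat) (h : xs[i]? = some true) :
    (PySem.List.pySetD xs u true)[i]? = some true := by
  simp only [PySem.List.pySetD, PySem.List.pySet?]
  cases hk : PySem.List.pyIdx? xs.length u with
  | none => simpa using h
  | some k =>
    simp only [Option.map_some, Option.getD_some, List.getElem?_set]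
    split_ifs <;> simp_all

theorem pvSetD_false_inv (xs : List Bool) (u : Int) (i : Nat)
    (h : (PySem.List.pySetD xs u true)[i]? = some false) : xs[i]? = some false := by
  simp only [PySem.List.pySetD, PySem.List.pySet?] at h
  cases hk : PySem.List.pyIdx? xs.length u with
  | none => simpa [hk] using h
  | some k =>
    rw [hk] at h
    simp only [Option.map_some, Option.getD_some, List.getElem?_set] at h
    split_ifs at h <;> simp_all

theorem pvIdxOf_unique (xs : List Int) (k : Nat) (val : Int)
    (h1 : xs[k]? = some val) (h2 : ∀ j, j ≠ k → xs[j]? ≠ some val) :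
    PySem.List.index? xs val = some k := by
  induction xs generalizing k with
  | nil => simp at h1
  | cons a l ih =>
    cases k with
    | zero =>
      have : a = val := by simpa using h1
      subst this
      exact PySem.List.index?_cons_self a l
    | succ k =>
      have hav : a ≠ val := by
        have := h2 0 (by omega)
        simpa using this
      rw [PySem.List.index?_cons_of_ne l hav,
        ih k (by simpa using h1) (fun j hj => by
          have := h2 (j + 1) (by omega); simpa using this)]
      rfl

-- the loop bodies of DFSVisit and reachB, as step functions of their folds
def pvStepA (G : List (List Int)) (fuel : Nat) :
    (Int × List Int × List Bool) → Int → (Int × List Int × List Bool) := fun s v =>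
  if PySem.List.pyGetD s.2.2 v true = false then dfsVisit G fuel v s.1 s.2.1 s.2.2 else s

def pvStepB (G : List (List Int)) (fuel : Nat) : List Bool → Int → List Bool := fun vis v =>
  reachB G fuel v vis

theorem dfsVisit_succ (G : List (List Int)) (fuel : Nat) (u t : Int) (vt : List Int)
    (vis : List Bool) :
    dfsVisit G (fuel + 1) u t vt vis =
      ((fun s => (s.1 + 1, PySem.List.pySetD s.2.1 u s.1, s.2.2))
        ((PySem.List.pyGetD G u []).foldl (pvStepA G fuel)
          (t, vt, PySem.List.pySetD vis u true))) := rfl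

theorem reachB_succ (G : List (List Int)) (fuel : Nat) (u : Int) (vis : List Bool)
    (h : PySem.List.pyGetD vis u true = false) :
    reachB G (fuel + 1) u vis =
      (PySem.List.pyGetD G u []).foldl (pvStepB G fuel) (PySem.List.pySetD vis u true) := by
  simp only [reachB, h]
  rfl

theorem pvReachNoop (G : List (List Int)) (fuel : Nat) (u : Int) (vis : List Bool)
    (h : PySem.List.pyGetD vis u true = true) : reachB G fuel u vis = vis := by
  cases fuel <;> simp [reachB, h]

-- lengths are preserved by dfsVisit
theorem pvLen (G : List (List Int)) :
    ∀ (fuel : Nat) (u t : Int) (vt : List Int) (vis : List Bool),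
      ((dfsVisit G fuel u t vt vis).2.1).length = vt.length ∧
      ((dfsVisit G fuel u t vt vis).2.2).length = vis.length := by
  intro fuel
  induction fuel with
  | zero => intro u t vt vis; simp [dfsVisit]
  | succ fuel ih =>
    intro u t vt vis
    rw [dfsVisit_succ]
    have key : ∀ (vs : List Int) (s : Int × List Int × List Bool),
        s.2.1.length = vt.length → s.2.2.length = vis.length →
        ((vs.foldl (pvStepA G fuel) s)).2.1.length = vt.length ∧
        ((vs.foldl (pvStepA G fuel) s)).2.2.length = vis.length := by
      intro vs
      induction vs with
      | nil => intro s h1 h2; exact ⟨h1, h2⟩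
      | cons v vs ihv =>
        intro s h1 h2
        rw [List.foldl_cons]
        by_cases hg : PySem.List.pyGetD s.2.2 v true = false
        · exact ihv _ (by simp only [pvStepA, if_pos hg]; rw [(ih v s.1 s.2.1 s.2.2).1, h1])
            (by simp only [pvStepA, if_pos hg]; rw [(ih v s.1 s.2.1 s.2.2).2, h2])
        · simpa only [pvStepA, if_neg hg] using ihv _ h1 h2
    have := key (PySem.List.pyGetD G u [])
      (t, vt, PySem.List.pySetD vis u true) rfl (PySem.List.length_pySetD _ _ _)
    exact ⟨by simpa [PySem.List.length_pySetD] using this.1, this.2⟩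

-- dfsVisit never unmarks a vertex
theorem pvMono (G : List (List Int)) :
    ∀ (fuel : Nat) (u t : Int) (vt : List Int) (vis : List Bool) (i : Nat),
      vis[i]? = some true → ((dfsVisit G fuel u t vt vis).2.2)[i]? = some true := by
  intro fuel
  induction fuel with
  | zero => intro u t vt vis i h; simpa [dfsVisit] using h
  | succ fuel ih =>
    intro u t vt vis i h
    rw [dfsVisit_succ]
    have key : ∀ (vs : List Int) (s : Int × List Int × List Bool),
        s.2.2[i]? = some true → ((vs.foldl (pvStepA G fuel) s)).2.2[i]? = some true := by
      intro vs
      induction vs with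
      | nil => intro s h1; exact h1
      | cons v vs ihv =>
        intro s h1
        rw [List.foldl_cons]
        by_cases hg : PySem.List.pyGetD s.2.2 v true = false
        · exact ihv _ (by simp only [pvStepA, if_pos hg]; exact ih v s.1 s.2.1 s.2.2 i h1)
        · simpa only [pvStepA, if_neg hg] using ihv _ h1
    exact key _ _ (pvSetD_true_mono vis u i h)

-- fold-level helpers for the neighbour loop of dfsVisit
theorem pvLenFold (G : List (List Int)) (fuel : Nat) :
    ∀ (vs : List Int) (s : Int × List Int × List Bool),
      ((vs.foldl (pvStepA G fuel) s)).2.1.length = s.2.1.length ∧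
      ((vs.foldl (pvStepA G fuel) s)).2.2.length = s.2.2.length := by
  intro vs
  induction vs with
  | nil => intro s; exact ⟨rfl, rfl⟩
  | cons v vs ihv =>
    intro s
    rw [List.foldl_cons]
    by_cases hg : PySem.List.pyGetD s.2.2 v true = false
    · have h1 := pvLen G fuel v s.1 s.2.1 s.2.2
      have h2 := ihv (pvStepA G fuel s v)
      simp only [pvStepA, if_pos hg] at h2
      simp only [pvStepA, if_pos hg]
      omega
    · simpa only [pvStepA, if_neg hg] using ihv s

theorem pvMonoFold (G : List (List Int)) (fuel : Nat) (i : Nat) :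
    ∀ (vs : List Int) (s : Int × List Int × List Bool),
      s.2.2[i]? = some true → ((vs.foldl (pvStepA G fuel) s)).2.2[i]? = some true := by
  intro vs
  induction vs with
  | nil => intro s h; exact h
  | cons v vs ihv =>
    intro s h
    rw [List.foldl_cons]
    by_cases hg : PySem.List.pyGetD s.2.2 v true = false
    · exact ihv _ (by simp only [pvStepA, if_pos hg]
                      exact pvMono G fuel v s.1 s.2.1 s.2.2 i h)
    · simpa only [pvStepA, if_neg hg] using ihv _ h

-- dfsVisit writes visitTime only at newly marked vertices
theorem pvFrame (G : List (List Int)) :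
    ∀ (fuel : Nat) (u t : Int) (vt : List Int) (vis : List Bool) (i : Nat),
      vt.length = vis.length →
      PySem.List.pyGetD vis u true = false →
      ((dfsVisit G fuel u t vt vis).2.1)[i]? ≠ vt[i]? →
      vis[i]? = some false ∧ ((dfsVisit G fuel u t vt vis).2.2)[i]? = some true := by
  intro fuel
  induction fuel with
  | zero => intro u t vt vis i _ _ h; simp [dfsVisit] at h
  | succ fuel ih =>
    intro u t vt vis i hlen hu h
    obtain ⟨hr, hk, hslot⟩ := pvGuard vis u hu
    have key : ∀ (vs : List Int) (s : Int × List Int × List Bool),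
        s.2.1.length = s.2.2.length →
        ((vs.foldl (pvStepA G fuel) s)).2.1[i]? ≠ s.2.1[i]? →
        s.2.2[i]? = some false ∧ ((vs.foldl (pvStepA G fuel) s)).2.2[i]? = some true := by
      intro vs
      induction vs with
      | nil => intro s _ h1; exact absurd rfl h1
      | cons v vs ihv =>
        intro s hsl h1
        rw [List.foldl_cons] at h1 ⊢
        by_cases hg : PySem.List.pyGetD s.2.2 v true = false
        · simp only [pvStepA, if_pos hg] at h1 ⊢
          set r := dfsVisit G fuel v s.1 s.2.1 s.2.2 with hrdef
          have hLL := pvLen G fuel v s.1 s.2.1 s.2.2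
          rw [← hrdef] at hLL
          have hrl : r.2.1.length = r.2.2.length := by omega
          by_cases hc : r.2.1[i]? = s.2.1[i]?
          · rw [← hc] at h1
            obtain ⟨hf, hm⟩ := ihv r hrl h1
            refine ⟨?_, hm⟩
            rcases h2 : s.2.2[i]? with _ | b
            · have hl2 := hLL.2
              rw [List.getElem?_eq_none_iff] at h2
              rw [List.getElem?_eq_some_iff] at hf
              obtain ⟨hlt, -⟩ := hf
              omega
            · cases b
              · rfl
              · have := pvMono G fuel v s.1 s.2.1 s.2.2 i h2
                rw [← hrdef] at this
                exact absurd this (by simp [hf])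
          · obtain ⟨hf, hm⟩ := ih v s.1 s.2.1 s.2.2 i hsl hg hc
            exact ⟨hf, pvMonoFold G fuel i vs r hm⟩
        · simp only [pvStepA, if_neg hg] at h1 ⊢
          exact ihv s hsl h1
    rw [dfsVisit_succ] at h ⊢
    simp only at h ⊢
    set s := (PySem.List.pyGetD G u []).foldl (pvStepA G fuel)
      (t, vt, PySem.List.pySetD vis u true) with hsdef
    have hmark : (PySem.List.pySetD vis u true)[pvIdx vis.length u]? = some true := by
      rw [pvSetD_norm vis u true hr.1 hr.2]
      simp [hk]
    have hsmark : s.2.2[pvIdx vis.length u]? = some true := pvMonoFold G fuel _ _ _ hmark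
    have hslen : s.2.1.length = vis.length := by
      have := (pvLenFold G fuel (PySem.List.pyGetD G u [])
        (t, vt, PySem.List.pySetD vis u true)).1
      simp only [hsdef] at this ⊢
      omega
    by_cases hi : i = pvIdx vis.length u
    · subst hi
      exact ⟨hslot, hsmark⟩
    · have hvteq : (PySem.List.pySetD s.2.1 u s.1)[i]? = s.2.1[i]? := by
        rw [pvSetD_norm s.2.1 u s.1 (by omega) (by omega), List.getElem?_set, hslen]
        rw [if_neg (by omega : ¬ (pvIdx vis.length u = i))]
      rw [hvteq] at h
      obtain ⟨hf, hm⟩ := key (PySem.List.pyGetD G u [])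
        (t, vt, PySem.List.pySetD vis u true)
        (by simp only [PySem.List.length_pySetD]; exact hlen) h
      exact ⟨pvSetD_false_inv vis u i hf, hm⟩

-- same fuel, same start, same visited list: dfsVisit and reachB mark the same vertices
theorem pvTrav (G : List (List Int)) :
    ∀ (fuel : Nat) (u t : Int) (vt : List Int) (vis : List Bool),
      PySem.List.pyGetD vis u true = false →
      (dfsVisit G fuel u t vt vis).2.2 = reachB G fuel u vis := by
  intro fuel
  induction fuel with
  | zero => intro u t vt vis _; simp [dfsVisit, reachB]
  | succ fuel ih =>
    intro u t vt vis hu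
    rw [dfsVisit_succ, reachB_succ G fuel u vis hu]
    simp only
    have key : ∀ (vs : List Int) (s : Int × List Int × List Bool),
        ((vs.foldl (pvStepA G fuel) s)).2.2 = vs.foldl (pvStepB G fuel) s.2.2 := by
      intro vs
      induction vs with
      | nil => intro s; rfl
      | cons v vs ihv =>
        intro s
        rw [List.foldl_cons, List.foldl_cons]
        by_cases hg : PySem.List.pyGetD s.2.2 v true = false
        · have hstep : (pvStepB G fuel) s.2.2 v = (pvStepA G fuel s v).2.2 := by
            simp only [pvStepA, pvStepB, if_pos hg]
            exact (ih v s.1 s.2.1 s.2.2 hg).symm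
          rw [hstep]
          exact ihv _
        · have hg' : PySem.List.pyGetD s.2.2 v true = true := by
            cases hx : PySem.List.pyGetD s.2.2 v true
            · exact absurd hx hg
            · rfl
          have hstep : (pvStepB G fuel) s.2.2 v = (pvStepA G fuel s v).2.2 := by
            simp only [pvStepA, pvStepB, if_neg hg]
            exact pvReachNoop G fuel v s.2.2 hg'
          rw [hstep]
          exact ihv _
    exact key _ _

-- the main invariant of DFSVisit: time accounting and finish-time bounds;
-- the root gets the largest finish time, every other newly marked vertex a smaller one
theorem pvMain (G : List (List Int)) :
    ∀ (fuel : Nat) (u t : Int) (vt : List Int) (vis : List Bool),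
      vis.length = G.length → vt.length = G.length →
      PySem.List.pyGetD vis u true = false →
      G.length < fuel + pvTC vis →
      (dfsVisit G fuel u t vt vis).1 =
          t + ((pvTC (dfsVisit G fuel u t vt vis).2.2 : Int) - (pvTC vis : Int)) ∧
      pvTC vis < pvTC (dfsVisit G fuel u t vt vis).2.2 ∧
      ((dfsVisit G fuel u t vt vis).2.2)[pvIdx G.length u]? = some true ∧
      ((dfsVisit G fuel u t vt vis).2.1)[pvIdx G.length u]? =
          some ((dfsVisit G fuel u t vt vis).1 - 1) ∧
      (∀ i, i ≠ pvIdx G.length u → vis[i]? = some false →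
        ((dfsVisit G fuel u t vt vis).2.2)[i]? = some true →
        ∃ x, ((dfsVisit G fuel u t vt vis).2.1)[i]? = some x ∧
          t ≤ x ∧ x < (dfsVisit G fuel u t vt vis).1 - 1) := by
  intro fuel
  induction fuel with
  | zero =>
    intro u t vt vis hv ht hu hfuel
    obtain ⟨hr, hk, hslot⟩ := pvGuard vis u hu
    have h1 : pvTC vis < vis.length := by
      have h2 := pvTC_set_true vis _ hslot
      have h3 := pvTC_le_len (vis.set (pvIdx vis.length u) true)
      simp only [List.length_set] at h3
      omega
    omega
  | succ fuel ih =>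
    intro u t vt vis hv ht hu hfuel
    obtain ⟨hr, hk, hslot⟩ := pvGuard vis u hu
    have huIeq : pvIdx vis.length u = pvIdx G.length u := by rw [hv]
    set uI := pvIdx G.length u with huI
    have hkG : uI < G.length := by omega
    set P : (Int × List Int × List Bool) → Prop := fun s =>
      s.2.2.length = G.length ∧ s.2.1.length = G.length ∧
      (s.1 = t + (pvTC s.2.2 : Int) - (pvTC vis : Int) - 1) ∧
      pvTC vis < pvTC s.2.2 ∧
      s.2.2[uI]? = some true ∧
      (∀ i, i ≠ uI → vis[i]? = some false → s.2.2[i]? = some true →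
        ∃ x, s.2.1[i]? = some x ∧ t ≤ x ∧ x < s.1) with hP
    have hbase : P (t, vt, PySem.List.pySetD vis u true) := by
      rw [hP]
      refine ⟨by simp [PySem.List.length_pySetD, hv], ht, ?_, ?_, ?_, ?_⟩
      · have := pvTC_set_true vis (pvIdx vis.length u) hslot
        rw [pvSetD_norm vis u true hr.1 hr.2]
        simp only
        omega
      · have := pvTC_set_true vis (pvIdx vis.length u) hslot
        rw [pvSetD_norm vis u true hr.1 hr.2]
        simp only
        omega
      · rw [pvSetD_norm vis u true hr.1 hr.2, List.getElem?_set, huIeq, if_pos rfl,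
          if_pos (by omega)]
      · intro i hiu hvf hvt
        rw [pvSetD_norm vis u true hr.1 hr.2, List.getElem?_set] at hvt
        rw [huIeq] at hvt
        rw [if_neg (by omega : ¬ (uI = i))] at hvt
        rw [hvf] at hvt
        simp at hvt
    have key : ∀ (vs : List Int) (s : Int × List Int × List Bool),
        P s → P (vs.foldl (pvStepA G fuel) s) := by
      intro vs
      induction vs with
      | nil => intro s hs; exact hs
      | cons v vs ihv =>
        intro s hs
        rw [List.foldl_cons]
        by_cases hg : PySem.List.pyGetD s.2.2 v true = false
        · refine ihv _ ?_
          simp only [pvStepA, if_pos hg]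
          obtain ⟨hs1, hs2, hs3, hs4, hs5, hs6⟩ := hs
          obtain ⟨hrv, hkv, hslotv⟩ := pvGuard s.2.2 v hg
          have hvIeq : pvIdx s.2.2.length v = pvIdx G.length v := by rw [hs1]
          obtain ⟨hA, hB, hC, hD, hE⟩ := ih v s.1 s.2.1 s.2.2 hs1 hs2 hg (by omega)
          set r := dfsVisit G fuel v s.1 s.2.1 s.2.2 with hrdef
          have hLL := pvLen G fuel v s.1 s.2.1 s.2.2
          rw [← hrdef] at hLL
          rw [hP]
          refine ⟨by omega, by omega, by omega, by omega, ?_, ?_⟩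
          · have := pvMono G fuel v s.1 s.2.1 s.2.2 uI hs5
            rw [← hrdef] at this
            exact this
          · intro i hiu hvf hmk
            by_cases hold : s.2.2[i]? = some true
            · obtain ⟨x, hx1, hx2, hx3⟩ := hs6 i hiu hvf hold
              have hfr := pvFrame G fuel v s.1 s.2.1 s.2.2 i (by omega) hg
              rw [← hrdef] at hfr
              by_cases hchg : r.2.1[i]? = s.2.1[i]?
              · exact ⟨x, by rw [hchg]; exact hx1, hx2, by omega⟩
              · obtain ⟨hco, -⟩ := hfr hchg
                rw [hold] at hco
                simp at hco
            · rcases hsome : s.2.2[i]? with _ | b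
              · rw [List.getElem?_eq_none_iff] at hsome
                rw [List.getElem?_eq_some_iff] at hmk
                obtain ⟨hlt, -⟩ := hmk
                omega
              · cases b
                · by_cases hiv : i = pvIdx G.length v
                  · subst hiv
                    exact ⟨r.1 - 1, hvIeq ▸ hD, by omega, by omega⟩
                  · obtain ⟨x, hx1, hx2, hx3⟩ := hE i hiv hsome hmk
                    exact ⟨x, hx1, by omega, by omega⟩
                · exact absurd hsome hold
        · simpa only [pvStepA, if_neg hg] using ihv s hs
    have hPs := key (PySem.List.pyGetD G u []) _ hbase
    rw [dfsVisit_succ]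
    simp only
    set s := (PySem.List.pyGetD G u []).foldl (pvStepA G fuel)
      (t, vt, PySem.List.pySetD vis u true) with hsdef
    rw [hP] at hPs
    obtain ⟨hs1, hs2, hs3, hs4, hs5, hs6⟩ := hPs
    have hset : (PySem.List.pySetD s.2.1 u s.1) = s.2.1.set uI s.1 := by
      rw [pvSetD_norm s.2.1 u s.1 (by omega) (by omega)]
      congr 1
      rw [hs2]
    refine ⟨by omega, by omega, hs5, ?_, ?_⟩
    · rw [hset, List.getElem?_set, if_pos rfl, if_pos (by omega)]
      simp
    · intro i hiu hvf hmk
      obtain ⟨x, hx1, hx2, hx3⟩ := hs6 i hiu hvf hmk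
      refine ⟨x, ?_, hx2, by omega⟩
      rw [hset, List.getElem?_set, if_neg (by omega : ¬ (uI = i))]
      exact hx1

-- resetting every slot in a length-n list yields a constant list
theorem pvReset {a : Type} (n : Nat) (c : a) (xs : List a) (h : xs.length = n) :
    (PySem.List.pyRange 0 (n : Int) 1).foldl (fun s u => PySem.List.pySetD s u c) xs =
      List.replicate n c := by
  have key : ∀ m, m ≤ n →
      (PySem.List.pyRange 0 (m : Int) 1).foldl (fun s u => PySem.List.pySetD s u c) xs =
        List.replicate m c ++ xs.drop m := by
    intro m
    induction m with
    | zero => intro _; simp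
    | succ m ihm =>
      intro hm
      have hcast : ((m + 1 : Nat) : Int) = (m : Int) + 1 := by push_cast; ring
      have hdrop : xs.drop m = xs[m] :: xs.drop (m + 1) :=
        List.drop_eq_getElem_cons (by omega)
      rw [hcast, PySem.List.pyRange_one_succ_right (by positivity), List.foldl_append,
        ihm (by omega), List.foldl_cons, List.foldl_nil, PySem.List.pySetD_natCast,
        List.set_append_right _ _ (by simp), hdrop]
      simp only [List.replicate_succ' (n := m), List.length_replicate, Nat.sub_self,
        List.set_cons_zero, List.append_assoc, List.cons_append, List.nil_append]
  have := key n le_rfl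
  simpa [List.drop_of_length_le, h] using this

-- the two forest-loop bodies (pvFB is a proof-only ghost tracking the last DFS root)
def pvFA (G : List (List Int)) : (Int × List Int × List Bool) → Int → (Int × List Int × List Bool) :=
  fun s u =>
    if PySem.List.pyGetD s.2.2 u true = false then
      dfsVisit G (G.length + 1) u s.1 s.2.1 s.2.2
    else s

def pvFB (G : List (List Int)) : (Int × List Bool) → Int → (Int × List Bool) := fun s u =>
  if PySem.List.pyGetD s.2 u true = false then (u, reachB G (G.length + 1) u s.2) else s

-- invariant of the two forest loops, run side by side
def pvQ (G : List (List Int)) (m : Nat) (sA : Int × List Int × List Bool)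
    (sB : Int × List Bool) : Prop :=
  sA.2.2 = sB.2 ∧ sA.2.2.length = G.length ∧ sA.2.1.length = G.length ∧
  (sA.1 = 1 + (pvTC sA.2.2 : Int)) ∧ (∀ i < m, sA.2.2[i]? = some true) ∧
  ((sA.2.2 = List.replicate G.length false ∧ sB.1 = -1) ∨
   (∃ rI : Nat, rI < G.length ∧ sB.1 = (rI : Int) ∧ sA.2.1[rI]? = some (sA.1 - 1) ∧
     (∀ i, i ≠ rI → sA.2.2[i]? = some true →
       ∃ x, sA.2.1[i]? = some x ∧ x < sA.1 - 1)))

theorem pvForest (G : List (List Int)) :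
    ∀ m, m ≤ G.length →
      pvQ G m
        ((PySem.List.pyRange 0 (m : Int) 1).foldl (pvFA G)
          (1, List.replicate G.length (-1), List.replicate G.length false))
        ((PySem.List.pyRange 0 (m : Int) 1).foldl (pvFB G)
          (-1, List.replicate G.length false)) := by
  intro m
  induction m with
  | zero =>
    intro _
    simp only [Nat.cast_zero]
    rw [show PySem.List.pyRange 0 0 1 = [] from rfl]
    simp only [List.foldl_nil]
    refine ⟨rfl, by simp, by simp, by simp [pvTC, List.count_replicate], by omega,
      Or.inl ⟨rfl, rfl⟩⟩
  | succ m ihm =>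
    intro hm
    have hQ := ihm (by omega)
    have hcast : ((m + 1 : Nat) : Int) = (m : Int) + 1 := by push_cast; ring
    rw [hcast, PySem.List.pyRange_one_succ_right (by positivity), List.foldl_append,
      List.foldl_append, List.foldl_cons, List.foldl_nil, List.foldl_cons, List.foldl_nil]
    set sA := (PySem.List.pyRange 0 (m : Int) 1).foldl (pvFA G)
      (1, List.replicate G.length (-1), List.replicate G.length false) with hsA
    set sB := (PySem.List.pyRange 0 (m : Int) 1).foldl (pvFB G)
      (-1, List.replicate G.length false) with hsB
    obtain ⟨hEq, hL2, hL1, hT, hVis, hDisj⟩ := hQ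
    have hmlt : m < G.length := by omega
    rcases hb : sA.2.2[m]? with _ | b
    · rw [List.getElem?_eq_none_iff] at hb
      omega
    · have hguard : PySem.List.pyGetD sA.2.2 (m : Int) true = b := by
        rw [PySem.List.pyGetD_natCast, List.getD_eq_getElem?_getD, hb]
        rfl
      cases b
      · have hstepA : pvFA G sA (m : Int) =
            dfsVisit G (G.length + 1) (m : Int) sA.1 sA.2.1 sA.2.2 := by
          simp [pvFA, hguard]
        have hstepB : pvFB G sB (m : Int) =
            ((m : Int), reachB G (G.length + 1) (m : Int) sB.2) := by
          simp [pvFB, ← hEq, hguard]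
        rw [hstepA, hstepB]
        obtain ⟨hA, hB, hC, hD, hE⟩ := pvMain G (G.length + 1) (m : Int) sA.1 sA.2.1 sA.2.2
          hL2 hL1 hguard (by omega)
        have hIdx : pvIdx G.length (m : Int) = m := by simp [pvIdx]
        rw [hIdx] at hC hD hE
        set rA := dfsVisit G (G.length + 1) (m : Int) sA.1 sA.2.1 sA.2.2 with hrA
        have hLL := pvLen G (G.length + 1) (m : Int) sA.1 sA.2.1 sA.2.2
        rw [← hrA] at hLL
        have hTr := pvTrav G (G.length + 1) (m : Int) sA.1 sA.2.1 sA.2.2 hguard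
        rw [← hrA, hEq] at hTr
        refine ⟨hTr, by omega, by omega, by omega, ?_, Or.inr ⟨m, hmlt, rfl, hD, ?_⟩⟩
        · intro i hi
          rcases Nat.lt_succ_iff_lt_or_eq.mp hi with hi' | hi'
          · have := pvMono G (G.length + 1) (m : Int) sA.1 sA.2.1 sA.2.2 i (hVis i hi')
            rw [← hrA] at this
            exact this
          · subst hi'; exact hC
        · intro i hi hvisR
          by_cases hOld : sA.2.2[i]? = some true
          · have hfr := pvFrame G (G.length + 1) (m : Int) sA.1 sA.2.1 sA.2.2 i
              (by omega) hguard
            rw [← hrA] at hfr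
            by_cases hchg : rA.2.1[i]? = sA.2.1[i]?
            · rcases hDisj with ⟨h1, -⟩ | ⟨rI, hrI, hBr, hRoot, hOthers⟩
              · exfalso
                rw [h1, List.getElem?_replicate] at hOld
                split_ifs at hOld
                simp at hOld
              · by_cases hirI : i = rI
                · subst hirI
                  exact ⟨sA.1 - 1, by rw [hchg]; exact hRoot, by omega⟩
                · obtain ⟨x, hx1, hx2⟩ := hOthers i hirI hOld
                  exact ⟨x, by rw [hchg]; exact hx1, by omega⟩
            · obtain ⟨hco, -⟩ := hfr hchg
              rw [hOld] at hco
              simp at hco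
          · rcases hsome : sA.2.2[i]? with _ | b2
            · rw [List.getElem?_eq_none_iff] at hsome
              rw [List.getElem?_eq_some_iff] at hvisR
              obtain ⟨hlt, -⟩ := hvisR
              omega
            · cases b2
              · obtain ⟨x, hx1, hx2, hx3⟩ := hE i hi hsome hvisR
                exact ⟨x, hx1, by omega⟩
              · exact absurd hsome hOld
      · have hstepA : pvFA G sA (m : Int) = sA := by simp [pvFA, hguard]
        have hstepB : pvFB G sB (m : Int) = sB := by simp [pvFB, ← hEq, hguard]
        rw [hstepA, hstepB]
        refine ⟨hEq, hL2, hL1, hT, ?_, ?_⟩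
        · intro i hi
          rcases Nat.lt_succ_iff_lt_or_eq.mp hi with hi' | hi'
          · exact hVis i hi'
          · subst hi'; exact hb
        · rcases hDisj with ⟨h1, -⟩ | hR
          · rw [h1, List.getElem?_replicate, if_pos hmlt] at hb
            simp at hb
          · exact Or.inr hR

-- the A port, rewritten over the named loop bodies (definitional)
theorem goodBeginning_eq (G : List (List Int)) :
    goodBeginning G =
      (let s := (PySem.List.pyRange 0 (G.length : Int) 1).foldl (pvFA G)
        (1, List.replicate G.length (-1), List.replicate G.length false)
      match PySem.List.index? s.2.1 (G.length : Int) with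
      | none => false
      | some maxV =>
        scanA (dfsVisit G (G.length + 1) (maxV : Int) s.1
          ((PySem.List.pyRange 0 (G.length : Int) 1).foldl
            (fun a u => PySem.List.pySetD a u (-1 : Int)) s.2.1)
          ((PySem.List.pyRange 0 (G.length : Int) 1).foldl
            (fun a u => PySem.List.pySetD a u false) s.2.2)).2.2) := by
  simp only [goodBeginning, List.map_const', List.length_range]
  rfl

theorem pvScanAll (l : List Bool) : scanA l = l.all (fun b => b) := by
  induction l with
  | nil => rfl
  | cons b r ih => cases b <;> simp [scanA, ih]

-- ===== reachability layer =====

-- a closed set of marks absorbs reachability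
theorem pvReach_closed (G : List (List Int)) (vis : List Bool)
    (hcl : ∀ i j, pvMk vis i → pvEdge G i j → pvMk vis j) :
    ∀ u i, pvMk vis u → pvReach G u i → pvMk vis i := by
  intro u i hu h
  induction h with
  | refl => exact hu
  | tail _ he ih => exact hcl _ _ ih he

theorem reachB_len (G : List (List Int)) :
    ∀ (fuel : Nat) (u : Int) (vis : List Bool), (reachB G fuel u vis).length = vis.length := by
  intro fuel
  induction fuel with
  | zero => intro u vis; rfl
  | succ fuel ih =>
    intro u vis
    by_cases hg : PySem.List.pyGetD vis u true = false
    · rw [reachB_succ G fuel u vis hg]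
      have key : ∀ (l : List Int) (s : List Bool),
          (l.foldl (pvStepB G fuel) s).length = s.length := by
        intro l
        induction l with
        | nil => intro s; rfl
        | cons v l ihl =>
          intro s
          rw [List.foldl_cons]
          rw [ihl]
          exact ih v s
      rw [key, PySem.List.length_pySetD]
    · have hg' : PySem.List.pyGetD vis u true = true := by
        cases hx : PySem.List.pyGetD vis u true
        · exact absurd hx hg
        · rfl
      rw [pvReachNoop G (fuel+1) u vis hg']

theorem reachB_mono (G : List (List Int)) :
    ∀ (fuel : Nat) (u : Int) (vis : List Bool) (i : Nat),
      pvMk vis i → pvMk (reachB G fuel u vis) i := by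
  intro fuel
  induction fuel with
  | zero => intro u vis i h; exact h
  | succ fuel ih =>
    intro u vis i h
    by_cases hg : PySem.List.pyGetD vis u true = false
    · rw [reachB_succ G fuel u vis hg]
      have key : ∀ (l : List Int) (s : List Bool),
          pvMk s i → pvMk (l.foldl (pvStepB G fuel) s) i := by
        intro l
        induction l with
        | nil => intro s h1; exact h1
        | cons v l ihl =>
          intro s h1
          rw [List.foldl_cons]
          exact ihl _ (ih v s i h1)
      exact key _ _ (pvSetD_true_mono vis u i h)
    · have hg' : PySem.List.pyGetD vis u true = true := by
        cases hx : PySem.List.pyGetD vis u true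
        · exact absurd hx hg
        · rfl
      rw [pvReachNoop G (fuel+1) u vis hg']
      exact h

theorem foldB_mono (G : List (List Int)) (fuel : Nat) :
    ∀ (l : List Int) (s : List Bool) (i : Nat),
      pvMk s i → pvMk (l.foldl (pvStepB G fuel) s) i := by
  intro l
  induction l with
  | nil => intro s i h; exact h
  | cons v l ihl =>
    intro s i h
    rw [List.foldl_cons]
    exact ihl _ _ (reachB_mono G fuel v s i h)

theorem reachB_self (G : List (List Int)) (fuel : Nat) (u : Int) (vis : List Bool)
    (hf : 0 < fuel) (hg : PySem.List.pyGetD vis u true = false) :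
    pvMk (reachB G fuel u vis) (pvIdx vis.length u) := by
  obtain ⟨hr, hk, hslot⟩ := pvGuard vis u hg
  obtain ⟨fuel', rfl⟩ : ∃ f, fuel = f + 1 := ⟨fuel - 1, by omega⟩
  rw [reachB_succ G fuel' u vis hg]
  apply foldB_mono
  rw [pvMk, pvSetD_norm vis u true hr.1 hr.2, List.getElem?_set, if_pos rfl, if_pos hk]

theorem reachB_sound (G : List (List Int)) :
    ∀ (fuel : Nat) (u : Int) (vis : List Bool), vis.length = G.length →
      ∀ i, pvMk (reachB G fuel u vis) i →
        pvMk vis i ∨ (pvInR G.length u ∧ pvReach G (pvIdx G.length u) i) := by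
  intro fuel
  induction fuel with
  | zero => intro u vis _ i h; exact Or.inl h
  | succ fuel ih =>
    intro u vis hlen i hi
    by_cases hg : PySem.List.pyGetD vis u true = false
    · obtain ⟨hr, hk, hslot⟩ := pvGuard vis u hg
      rw [hlen] at hr
      rw [reachB_succ G fuel u vis hg] at hi
      have hrow : PySem.List.pyGetD G u [] = G.getD (pvIdx G.length u) [] := by
        rw [pvGetD_norm G u [] hr.1 hr.2, List.getD_eq_getElem?_getD]
      have key : ∀ (l : List Int), (∀ v ∈ l, v ∈ G.getD (pvIdx G.length u) []) →
          ∀ (s : List Bool), s.length = G.length →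
          (∀ j, pvMk s j → pvMk vis j ∨ pvReach G (pvIdx G.length u) j) →
          ∀ j, pvMk (l.foldl (pvStepB G fuel) s) j →
            pvMk vis j ∨ pvReach G (pvIdx G.length u) j := by
        intro l
        induction l with
        | nil => intro _ s _ hs j hj; exact hs j hj
        | cons v l ihl =>
          intro hmem s hslen hs j hj
          rw [List.foldl_cons] at hj
          refine ihl (fun w hw => hmem w (List.mem_cons_of_mem _ hw)) _
            (by rw [show (pvStepB G fuel s v) = reachB G fuel v s from rfl, reachB_len]; exact hslen)
            ?_ j hj
          intro k hk2
          rcases ih v s hslen k hk2 with hold | ⟨hinr, hre⟩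
          · exact hs k hold
          · right
            have hedge : pvEdge G (pvIdx G.length u) (pvIdx G.length v) :=
              ⟨v, hmem v (List.mem_cons_self), hinr, rfl⟩
            exact Relation.ReflTransGen.head hedge hre
      rw [hrow] at hi
      have hbase : ∀ j, pvMk (PySem.List.pySetD vis u true) j →
          pvMk vis j ∨ pvReach G (pvIdx G.length u) j := by
        intro j hj
        rw [pvMk, pvSetD_norm vis u true (by rw [hlen]; exact hr.1) (by rw [hlen]; exact hr.2),
          List.getElem?_set, hlen] at hj
        by_cases hju : pvIdx G.length u = j
        · subst hju
          exact Or.inr Relation.ReflTransGen.refl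
        · rw [if_neg hju] at hj
          exact Or.inl hj
      have := key _ (fun v hv => hv) (PySem.List.pySetD vis u true)
        (by rw [PySem.List.length_pySetD]; exact hlen) hbase i hi
      rcases this with h | h
      · exact Or.inl h
      · exact Or.inr ⟨hr, h⟩
    · have hg' : PySem.List.pyGetD vis u true = true := by
        cases hx : PySem.List.pyGetD vis u true
        · exact absurd hx hg
        · rfl
      rw [pvReachNoop G (fuel+1) u vis hg'] at hi
      exact Or.inl hi

theorem foldB_marks (G : List (List Int)) (fuel : Nat) :
    ∀ (l : List Int) (s : List Bool), s.length = G.length → G.length < fuel + pvTC s →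
      ∀ v ∈ l, pvInR G.length v → pvMk (l.foldl (pvStepB G fuel) s) (pvIdx G.length v) := by
  intro l
  induction l with
  | nil => intro s _ _ v hv; simp at hv
  | cons w l ihl =>
    intro s hslen hfu v hv hinr
    rw [List.foldl_cons]
    have hlen' : (pvStepB G fuel s w).length = G.length := by
      rw [show pvStepB G fuel s w = reachB G fuel w s from rfl, reachB_len]; exact hslen
    have hcnt : pvTC s ≤ pvTC (pvStepB G fuel s w) := by
      refine pvTC_mono _ _ ?_ ?_
      · rw [hlen']; exact hslen.symm ▸ rfl
      · intro i hi; exact reachB_mono G fuel w s i hi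
    rcases List.mem_cons.mp hv with rfl | hvl
    · by_cases hg : PySem.List.pyGetD s v true = false
      · have hf : 0 < fuel := by
          have := pvTC_le_len s
          omega
        have := reachB_self G fuel v s hf hg
        rw [hslen] at this
        exact foldB_mono G fuel l _ _ this
      · have hg' : PySem.List.pyGetD s v true = true := by
          cases hx : PySem.List.pyGetD s v true
          · exact absurd hx hg
          · rfl
        have := pvGuardT s v (by rw [hslen]; exact hinr.1) (by rw [hslen]; exact hinr.2) hg'
        rw [hslen] at this
        exact foldB_mono G fuel l _ _
          (reachB_mono G fuel v s _ this)
    · exact ihl _ hlen' (by omega) v hvl hinr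

theorem reachB_inv (G : List (List Int)) :
    ∀ (fuel : Nat) (u : Int) (vis : List Bool), vis.length = G.length →
      G.length < fuel + pvTC vis →
      ∀ i, pvMk (reachB G fuel u vis) i →
        pvMk vis i ∨ ∀ j, pvEdge G i j → pvMk (reachB G fuel u vis) j := by
  intro fuel
  induction fuel with
  | zero =>
    intro u vis hlen hfu i _
    have := pvTC_le_len vis
    omega
  | succ fuel ih =>
    intro u vis hlen hfu i hi
    by_cases hg : PySem.List.pyGetD vis u true = false
    · obtain ⟨hr, hk, hslot⟩ := pvGuard vis u hg
      have hrG : -(G.length : Int) ≤ u ∧ u < G.length := by rw [← hlen]; exact hr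
      have huIeq : pvIdx vis.length u = pvIdx G.length u := by rw [hlen]
      rw [reachB_succ G fuel u vis hg] at hi ⊢
      set vis1 := PySem.List.pySetD vis u true with hvis1
      have hv1set : vis1 = vis.set (pvIdx G.length u) true := by
        rw [hvis1, pvSetD_norm vis u true hr.1 hr.2, huIeq]
      have hv1len : vis1.length = G.length := by
        rw [hvis1, PySem.List.length_pySetD]; exact hlen
      have hv1cnt : pvTC vis1 = pvTC vis + 1 := by
        rw [hv1set]
        exact pvTC_set_true vis _ (huIeq ▸ hslot)
      set row := PySem.List.pyGetD G u [] with hrow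
      have key : ∀ (l : List Int) (s : List Bool),
          s.length = G.length → pvTC vis < pvTC s →
          (∀ k, pvMk s k → k = pvIdx G.length u ∨ pvMk vis k ∨
            ∀ j, pvEdge G k j → pvMk s j) →
          (l.foldl (pvStepB G fuel) s).length = G.length ∧
          pvTC vis < pvTC (l.foldl (pvStepB G fuel) s) ∧
          (∀ k, pvMk (l.foldl (pvStepB G fuel) s) k → k = pvIdx G.length u ∨ pvMk vis k ∨
            ∀ j, pvEdge G k j → pvMk (l.foldl (pvStepB G fuel) s) j) := by
        intro l
        induction l with
        | nil => intro s h1 h2 h3; exact ⟨h1, h2, h3⟩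
        | cons v l ihl =>
          intro s h1 h2 h3
          rw [List.foldl_cons]
          have hstep : pvStepB G fuel s v = reachB G fuel v s := rfl
          have hlen' : (pvStepB G fuel s v).length = G.length := by
            rw [hstep, reachB_len]; exact h1
          have hcnt' : pvTC s ≤ pvTC (pvStepB G fuel s v) := by
            refine pvTC_mono _ _ (by rw [hlen', h1]) ?_
            intro k hk; exact reachB_mono G fuel v s k hk
          refine ihl _ hlen' (by omega) ?_
          intro k hk
          by_cases hgv : PySem.List.pyGetD s v true = false
          · rcases ih v s h1 (by omega) k (hstep ▸ hk) with hold | hsucc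
            · rcases h3 k hold with h | h | h
              · exact Or.inl h
              · exact Or.inr (Or.inl h)
              · refine Or.inr (Or.inr ?_)
                intro j hj
                exact reachB_mono G fuel v s j (h j hj)
            · refine Or.inr (Or.inr ?_)
              intro j hj
              exact hstep ▸ hsucc j hj
          · have hg' : PySem.List.pyGetD s v true = true := by
              cases hx : PySem.List.pyGetD s v true
              · exact absurd hx hgv
              · rfl
            have hnoop : pvStepB G fuel s v = s := by
              rw [hstep, pvReachNoop G fuel v s hg']
            rw [hnoop] at hk ⊢
            exact h3 k hk
      have hbase : ∀ k, pvMk vis1 k → k = pvIdx G.length u ∨ pvMk vis k ∨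
          ∀ j, pvEdge G k j → pvMk vis1 j := by
        intro k hk
        rw [pvMk, hv1set, List.getElem?_set] at hk
        by_cases hku : pvIdx G.length u = k
        · exact Or.inl hku.symm
        · rw [if_neg hku] at hk
          exact Or.inr (Or.inl hk)
      obtain ⟨hFlen, hFcnt, hFprop⟩ := key row vis1 hv1len (by omega) hbase
      rcases hFprop i hi with hiu | hvisi | hsucc
      · subst hiu
        refine Or.inr ?_
        intro j hj
        obtain ⟨v, hvmem, hvinr, rfl⟩ := hj
        have hrow_eq : row = G.getD (pvIdx G.length u) [] := by
          rw [hrow, pvGetD_norm G u [] hrG.1 hrG.2, List.getD_eq_getElem?_getD]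
        exact foldB_marks G fuel row vis1 hv1len (by omega) v (by rw [hrow_eq]; exact hvmem) hvinr
      · exact Or.inl hvisi
      · exact Or.inr hsucc
    · have hg' : PySem.List.pyGetD vis u true = true := by
        cases hx : PySem.List.pyGetD vis u true
        · exact absurd hx hg
        · rfl
      rw [pvReachNoop G (fuel+1) u vis hg'] at hi
      exact Or.inl hi

theorem reachB_closed (G : List (List Int)) (u : Int) (vis : List Bool)
    (hlen : vis.length = G.length)
    (hcl : ∀ i j, pvMk vis i → pvEdge G i j → pvMk vis j) :
    ∀ i j, pvMk (reachB G (G.length + 1) u vis) i → pvEdge G i j →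
      pvMk (reachB G (G.length + 1) u vis) j := by
  intro i j hi hij
  rcases reachB_inv G (G.length + 1) u vis hlen (by omega) i hi with hold | hsucc
  · exact reachB_mono G _ u vis j (hcl i j hold hij)
  · exact hsucc j hij

-- ===== BFS layer (B's frontier loop) =====

def pvBStep (G : List (List Int)) : (List Bool × List Int) → Int → (List Bool × List Int) :=
  fun s x =>
    if PySem.List.pyGetD s.1 x true = false then
      (PySem.List.pySetD s.1 x true, s.2 ++ PySem.List.pyGetD G x [])
    else s

theorem bfsRound_eq (G : List (List Int)) (f : List Int) (seen : List Bool) :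
    bfsRound G f seen = f.foldl (pvBStep G) (seen, []) := rfl

theorem rdLen (G : List (List Int)) :
    ∀ (f : List Int) (s : List Bool × List Int),
      (f.foldl (pvBStep G) s).1.length = s.1.length := by
  intro f
  induction f with
  | nil => intro s; rfl
  | cons x f ihf =>
    intro s
    rw [List.foldl_cons, ihf]
    by_cases hg : PySem.List.pyGetD s.1 x true = false
    · simp only [pvBStep, if_pos hg, PySem.List.length_pySetD]
    · simp only [pvBStep, if_neg hg]

theorem rdMono (G : List (List Int)) :
    ∀ (f : List Int) (s : List Bool × List Int) (i : Nat),
      pvMk s.1 i → pvMk (f.foldl (pvBStep G) s).1 i := by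
  intro f
  induction f with
  | nil => intro s i h; exact h
  | cons x f ihf =>
    intro s i h
    rw [List.foldl_cons]
    refine ihf _ i ?_
    by_cases hg : PySem.List.pyGetD s.1 x true = false
    · simp only [pvBStep, if_pos hg]
      exact pvSetD_true_mono s.1 x i h
    · simpa only [pvBStep, if_neg hg] using h

theorem rdNxtMono (G : List (List Int)) :
    ∀ (f : List Int) (s : List Bool × List Int) (v : Int),
      v ∈ s.2 → v ∈ (f.foldl (pvBStep G) s).2 := by
  intro f
  induction f with
  | nil => intro s v h; exact h
  | cons x f ihf =>
    intro s v h
    rw [List.foldl_cons]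
    refine ihf _ v ?_
    by_cases hg : PySem.List.pyGetD s.1 x true = false
    · simp only [pvBStep, if_pos hg]
      exact List.mem_append_left _ h
    · simpa only [pvBStep, if_neg hg] using h

theorem rdSound1 (G : List (List Int)) :
    ∀ (f : List Int) (s : List Bool × List Int), s.1.length = G.length →
      ∀ i, pvMk (f.foldl (pvBStep G) s).1 i →
        pvMk s.1 i ∨ ∃ x ∈ f, pvInR G.length x ∧ pvIdx G.length x = i := by
  intro f
  induction f with
  | nil => intro s _ i h; exact Or.inl h
  | cons x f ihf =>
    intro s hlen i h
    rw [List.foldl_cons] at h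
    have hlen' : (pvBStep G s x).1.length = G.length := by
      by_cases hg : PySem.List.pyGetD s.1 x true = false
      · simp only [pvBStep, if_pos hg, PySem.List.length_pySetD]; exact hlen
      · simpa only [pvBStep, if_neg hg] using hlen
    rcases ihf _ hlen' i h with h1 | ⟨y, hy, hr, hi⟩
    · by_cases hg : PySem.List.pyGetD s.1 x true = false
      · obtain ⟨hr, hk, hslot⟩ := pvGuard s.1 x hg
        rw [hlen] at hr
        simp only [pvBStep, if_pos hg] at h1
        rw [pvMk, pvSetD_norm s.1 x true (by rw [hlen]; exact hr.1) (by rw [hlen]; exact hr.2),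
          List.getElem?_set, hlen] at h1
        by_cases hxi : pvIdx G.length x = i
        · exact Or.inr ⟨x, List.mem_cons_self, hr, hxi⟩
        · rw [if_neg hxi] at h1
          exact Or.inl h1
      · simp only [pvBStep, if_neg hg] at h1
        exact Or.inl h1
    · exact Or.inr ⟨y, List.mem_cons_of_mem _ hy, hr, hi⟩

theorem rdNxtSound (G : List (List Int)) :
    ∀ (f : List Int) (s : List Bool × List Int), s.1.length = G.length →
      ∀ v ∈ (f.foldl (pvBStep G) s).2,
        v ∈ s.2 ∨ ∃ x ∈ f, pvInR G.length x ∧ v ∈ G.getD (pvIdx G.length x) [] := by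
  intro f
  induction f with
  | nil => intro s _ v h; exact Or.inl h
  | cons x f ihf =>
    intro s hlen v h
    rw [List.foldl_cons] at h
    have hlen' : (pvBStep G s x).1.length = G.length := by
      by_cases hg : PySem.List.pyGetD s.1 x true = false
      · simp only [pvBStep, if_pos hg, PySem.List.length_pySetD]; exact hlen
      · simpa only [pvBStep, if_neg hg] using hlen
    rcases ihf _ hlen' v h with h1 | ⟨y, hy, hr, hv⟩
    · by_cases hg : PySem.List.pyGetD s.1 x true = false
      · obtain ⟨hrr, hk, hslot⟩ := pvGuard s.1 x hg
        rw [hlen] at hrr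
        simp only [pvBStep, if_pos hg] at h1
        rcases List.mem_append.mp h1 with h2 | h2
        · exact Or.inl h2
        · refine Or.inr ⟨x, List.mem_cons_self, hrr, ?_⟩
          rw [pvGetD_norm G x [] hrr.1 hrr.2] at h2
          rw [List.getD_eq_getElem?_getD]
          exact h2
      · simp only [pvBStep, if_neg hg] at h1
        exact Or.inl h1
    · exact Or.inr ⟨y, List.mem_cons_of_mem _ hy, hr, hv⟩

theorem rdFrontMark (G : List (List Int)) :
    ∀ (f : List Int) (s : List Bool × List Int), s.1.length = G.length →
      ∀ x ∈ f, pvInR G.length x → pvMk (f.foldl (pvBStep G) s).1 (pvIdx G.length x) := by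
  intro f
  induction f with
  | nil => intro s _ x hx; simp at hx
  | cons y f ihf =>
    intro s hlen x hx hinr
    rw [List.foldl_cons]
    have hlen' : (pvBStep G s y).1.length = G.length := by
      by_cases hg : PySem.List.pyGetD s.1 y true = false
      · simp only [pvBStep, if_pos hg, PySem.List.length_pySetD]; exact hlen
      · simpa only [pvBStep, if_neg hg] using hlen
    rcases List.mem_cons.mp hx with rfl | hxf
    · refine rdMono G f _ _ ?_
      by_cases hg : PySem.List.pyGetD s.1 x true = false
      · simp only [pvBStep, if_pos hg]
        rw [pvMk, pvSetD_norm s.1 x true (by rw [hlen]; exact hinr.1) (by rw [hlen]; exact hinr.2),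
          List.getElem?_set, hlen, if_pos rfl, if_pos (pvIdx_lt G.length x hinr.1 hinr.2)]
      · have hg' : PySem.List.pyGetD s.1 x true = true := by
          cases hxx : PySem.List.pyGetD s.1 x true
          · exact absurd hxx hg
          · rfl
        have := pvGuardT s.1 x (by rw [hlen]; exact hinr.1) (by rw [hlen]; exact hinr.2) hg'
        rw [hlen] at this
        simpa only [pvBStep, if_neg hg] using this
    · exact ihf _ hlen' x hxf hinr

theorem rdRowNxt (G : List (List Int)) :
    ∀ (f : List Int) (s : List Bool × List Int), s.1.length = G.length →
      ∀ i, pvMk (f.foldl (pvBStep G) s).1 i →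
        pvMk s.1 i ∨ ∀ v ∈ G.getD i [], v ∈ (f.foldl (pvBStep G) s).2 := by
  intro f
  induction f with
  | nil => intro s _ i h; exact Or.inl h
  | cons x f ihf =>
    intro s hlen i h
    rw [List.foldl_cons] at h ⊢
    have hlen' : (pvBStep G s x).1.length = G.length := by
      by_cases hg : PySem.List.pyGetD s.1 x true = false
      · simp only [pvBStep, if_pos hg, PySem.List.length_pySetD]; exact hlen
      · simpa only [pvBStep, if_neg hg] using hlen
    rcases ihf _ hlen' i h with h1 | h1
    · by_cases hg : PySem.List.pyGetD s.1 x true = false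
      · obtain ⟨hrr, hk, hslot⟩ := pvGuard s.1 x hg
        rw [hlen] at hrr
        simp only [pvBStep, if_pos hg] at h1
        rw [pvMk, pvSetD_norm s.1 x true (by rw [hlen]; exact hrr.1) (by rw [hlen]; exact hrr.2),
          List.getElem?_set, hlen] at h1
        by_cases hxi : pvIdx G.length x = i
        · subst hxi
          refine Or.inr ?_
          intro v hv
          refine rdNxtMono G f _ v ?_
          simp only [pvBStep, if_pos hg]
          refine List.mem_append_right _ ?_
          rw [pvGetD_norm G x [] hrr.1 hrr.2, ← List.getD_eq_getElem?_getD]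
          exact hv
        · rw [if_neg hxi] at h1
          exact Or.inl h1
      · simp only [pvBStep, if_neg hg] at h1
        exact Or.inl h1
    · exact Or.inr h1

theorem rdCnt (G : List (List Int)) (f : List Int) (s : List Bool × List Int) :
    pvTC s.1 ≤ pvTC (f.foldl (pvBStep G) s).1 := by
  refine pvTC_mono _ _ (by rw [rdLen]) ?_
  intro i hi
  exact rdMono G f s i hi

theorem rdProg (G : List (List Int)) :
    ∀ (f : List Int) (s : List Bool × List Int),
      (f.foldl (pvBStep G) s).2 ≠ [] → s.2 ≠ [] ∨ pvTC s.1 < pvTC (f.foldl (pvBStep G) s).1 := by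
  intro f
  induction f with
  | nil => intro s h; exact Or.inl h
  | cons x f ihf =>
    intro s h
    rw [List.foldl_cons] at h ⊢
    by_cases hg : PySem.List.pyGetD s.1 x true = false
    · obtain ⟨hrr, hk, hslot⟩ := pvGuard s.1 x hg
      refine Or.inr ?_
      have h1 : pvTC (pvBStep G s x).1 = pvTC s.1 + 1 := by
        simp only [pvBStep, if_pos hg]
        rw [pvSetD_norm s.1 x true hrr.1 hrr.2]
        exact pvTC_set_true s.1 _ hslot
      have h2 := rdCnt G f (pvBStep G s x)
      omega
    · simp only [pvBStep, if_neg hg] at h ⊢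
      exact ihf s h

theorem bfsLoop_main (G : List (List Int))
    (hPre : ∀ i, ∀ v ∈ G.getD i [], pvInR G.length v) :
    ∀ (fuel : Nat) (f : List Int) (seen : List Bool),
      seen.length = G.length →
      G.length < fuel + pvTC seen →
      (∀ x ∈ f, pvInR G.length x) →
      (∀ i, pvMk seen i → ∀ v ∈ G.getD i [], v ∈ f ∨ pvMk seen (pvIdx G.length v)) →
      (bfsLoop G fuel f seen).length = G.length ∧
      (∀ i, pvMk seen i → pvMk (bfsLoop G fuel f seen) i) ∧
      (∀ i, pvMk (bfsLoop G fuel f seen) i →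
        pvMk seen i ∨ ∃ x ∈ f, pvReach G (pvIdx G.length x) i) ∧
      (∀ x ∈ f, pvMk (bfsLoop G fuel f seen) (pvIdx G.length x)) ∧
      (∀ i j, pvMk (bfsLoop G fuel f seen) i → pvEdge G i j →
        pvMk (bfsLoop G fuel f seen) j) := by
  intro fuel
  induction fuel with
  | zero =>
    intro f seen hlen hfu hfr hH
    cases f with
    | nil =>
      refine ⟨hlen, fun i h => h, fun i h => Or.inl h, by intro x hx; simp at hx, ?_⟩
      intro i j hi hij
      obtain ⟨v, hv, hinr, rfl⟩ := hij
      rcases hH i hi v hv with h | h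
      · simp at h
      · exact h
    | cons x f =>
      exfalso
      have := pvTC_le_len seen
      omega
  | succ fuel ih =>
    intro f seen hlen hfu hfr hH
    cases f with
    | nil =>
      refine ⟨hlen, fun i h => h, fun i h => Or.inl h, by intro x hx; simp at hx, ?_⟩
      intro i j hi hij
      obtain ⟨v, hv, hinr, rfl⟩ := hij
      rcases hH i hi v hv with h | h
      · simp at h
      · exact h
    | cons x f =>
      have hred : bfsLoop G (fuel+1) (x :: f) seen =
          bfsLoop G fuel (bfsRound G (x :: f) seen).2 (bfsRound G (x :: f) seen).1 := rfl
      rw [bfsRound_eq] at hred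
      set r := (x :: f).foldl (pvBStep G) (seen, ([] : List Int)) with hr
      have hs0 : ((seen, ([] : List Int)) : List Bool × List Int).1 = seen := rfl
      have hrlen : r.1.length = G.length := by rw [hr, rdLen]; exact hlen
      have hrmono : ∀ i, pvMk seen i → pvMk r.1 i := fun i hi => rdMono G _ _ i hi
      have hrcnt : pvTC seen ≤ pvTC r.1 := by rw [hr]; exact rdCnt G (x :: f) (seen, [])
      have hrfr : ∀ y ∈ r.2, pvInR G.length y := by
        intro y hy
        rcases rdNxtSound G (x :: f) _ hlen y hy with h | ⟨z, _, _, hrow⟩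
        · simp at h
        · exact hPre _ y hrow
      have hrH : ∀ i, pvMk r.1 i → ∀ v ∈ G.getD i [],
          v ∈ r.2 ∨ pvMk r.1 (pvIdx G.length v) := by
        intro i hi v hv
        rcases rdRowNxt G (x :: f) _ hlen i hi with hseen | hnxt
        · rcases hH i hseen v hv with hvf | hvm
          · exact Or.inr (rdFrontMark G (x :: f) _ hlen v hvf (hPre i v hv))
          · exact Or.inr (hrmono _ hvm)
        · exact Or.inl (hnxt v hv)
      by_cases hnil : r.2 = []
      · have hres : bfsLoop G (fuel+1) (x :: f) seen = r.1 := by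
          rw [hred, hnil]
          cases fuel <;> rfl
        rw [hres]
        refine ⟨hrlen, hrmono, ?_, ?_, ?_⟩
        · intro i hi
          rcases rdSound1 G (x :: f) _ hlen i hi with h | ⟨y, hy, hinr, hidx⟩
          · exact Or.inl h
          · exact Or.inr ⟨y, hy, hidx ▸ Relation.ReflTransGen.refl⟩
        · intro y hy
          exact rdFrontMark G (x :: f) _ hlen y hy (hfr y hy)
        · intro i j hi hij
          obtain ⟨v, hv, hinr, rfl⟩ := hij
          rcases hrH i hi v hv with h | h
          · rw [hnil] at h; simp at h
          · exact h
      · have hstrict : pvTC seen < pvTC r.1 := by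
          rcases rdProg G (x :: f) (seen, []) hnil with h | h
          · simp at h
          · exact h
        obtain ⟨ilen, imono, isound, ifront, iclosed⟩ :=
          ih r.2 r.1 hrlen (by omega) hrfr hrH
        rw [hred]
        refine ⟨ilen, fun i hi => imono i (hrmono i hi), ?_, ?_, iclosed⟩
        · intro i hi
          rcases isound i hi with h | ⟨y, hy, hre⟩
          · rcases rdSound1 G (x :: f) _ hlen i h with h2 | ⟨z, hz, hinr, hidx⟩
            · exact Or.inl h2
            · exact Or.inr ⟨z, hz, hidx ▸ Relation.ReflTransGen.refl⟩
          · rcases rdNxtSound G (x :: f) _ hlen y hy with h2 | ⟨z, hz, hzr, hrow⟩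
            · simp at h2
            · refine Or.inr ⟨z, hz, ?_⟩
              have hedge : pvEdge G (pvIdx G.length z) (pvIdx G.length y) :=
                ⟨y, hrow, hPre _ y hrow, rfl⟩
              exact Relation.ReflTransGen.head hedge hre
        · intro y hy
          exact imono _ (rdFrontMark G (x :: f) _ hlen y hy (hfr y hy))

-- ===== final assembly helpers =====

theorem pvMkRepF (n i : Nat) : ¬ pvMk (List.replicate n false) i := by
  intro h
  rw [pvMk, List.getElem?_replicate] at h
  split_ifs at h <;> simp_all

theorem pvTCRep0 (n : Nat) : pvTC (List.replicate n false) = 0 := by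
  simp [pvTC, List.count_replicate]

theorem pvAll_iff (l : List Bool) :
    (l.all (fun b => b) = true) ↔ ∀ i < l.length, l[i]? = some true := by
  induction l with
  | nil => simp
  | cons b t ih =>
    cases b
    · simp only [List.all_cons]
      constructor
      · intro h; simp at h
      · intro h
        have := h 0 (by simp)
        simp at this
    · simp only [List.all_cons, Bool.true_and]
      rw [ih]
      constructor
      · intro h i hi
        cases i with
        | zero => simp
        | succ i => simpa using h i (by simpa using hi)
      · intro h i hi
        have := h (i + 1) (by simpa using hi)
        simpa using this

theorem bruteLoop_iff (G : List (List Int)) :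
    ∀ l, bruteLoop G l = true ↔
      ∃ u ∈ l, (bfsLoop G (G.length + 1) [u] (List.replicate G.length false)).all
        (fun b => b) = true := by
  intro l
  induction l with
  | nil => simp [bruteLoop]
  | cons u rest ih =>
    simp only [bruteLoop]
    by_cases h : (bfsLoop G (G.length + 1) [u] (List.replicate G.length false)).all
        (fun b => b) = true
    · simp only [if_pos h]
      constructor
      · intro _; exact ⟨u, List.mem_cons_self, h⟩
      · intro _; trivial
    · simp only [if_neg h, ih]
      constructor
      · rintro ⟨v, hv, hall⟩
        exact ⟨v, List.mem_cons_of_mem _ hv, hall⟩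
      · rintro ⟨v, hv, hall⟩
        rcases List.mem_cons.mp hv with rfl | hv'
        · exact absurd hall h
        · exact ⟨v, hv', hall⟩

theorem mem_pyRange_iff (n : Nat) (u : Int) :
    u ∈ PySem.List.pyRange 0 (n : Int) 1 ↔ ∃ k : Nat, k < n ∧ u = (k : Int) := by
  induction n with
  | zero =>
    rw [show ((0 : Nat) : Int) = 0 from rfl, show PySem.List.pyRange 0 0 1 = [] from rfl]
    simp
  | succ n ih =>
    have hcast : ((n + 1 : Nat) : Int) = (n : Int) + 1 := by push_cast; ring
    rw [hcast, PySem.List.pyRange_one_succ_right (by positivity), List.mem_append, ih]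
    constructor
    · rintro (⟨k, hk, rfl⟩ | hu)
      · exact ⟨k, by omega, rfl⟩
      · exact ⟨n, by omega, by simpa using hu⟩
    · rintro ⟨k, hk, rfl⟩
      by_cases hkn : k < n
      · exact Or.inl ⟨k, hkn, rfl⟩
      · have : k = n := by omega
        subst this
        exact Or.inr (by simp)

-- forest-loop reachability invariant: the visited set stays closed, everything below m is
-- visited, and the candidate root c satisfies: every visited i is reachable from c or does
-- not reach c
theorem pvForestReach (G : List (List Int))
    (hPre : ∀ i, ∀ v ∈ G.getD i [], pvInR G.length v) :
    ∀ m, m ≤ G.length →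
      (((PySem.List.pyRange 0 (m : Int) 1).foldl (pvFB G)
          (-1, List.replicate G.length false)).2.length = G.length) ∧
      (∀ i j, pvMk ((PySem.List.pyRange 0 (m : Int) 1).foldl (pvFB G)
          (-1, List.replicate G.length false)).2 i → pvEdge G i j →
        pvMk ((PySem.List.pyRange 0 (m : Int) 1).foldl (pvFB G)
          (-1, List.replicate G.length false)).2 j) ∧
      (∀ i < m, pvMk ((PySem.List.pyRange 0 (m : Int) 1).foldl (pvFB G)
          (-1, List.replicate G.length false)).2 i) ∧
      ((((PySem.List.pyRange 0 (m : Int) 1).foldl (pvFB G)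
          (-1, List.replicate G.length false)).1 = -1 ∧
        ∀ i, ¬ pvMk ((PySem.List.pyRange 0 (m : Int) 1).foldl (pvFB G)
          (-1, List.replicate G.length false)).2 i) ∨
       (∃ c : Nat, c < G.length ∧
        ((PySem.List.pyRange 0 (m : Int) 1).foldl (pvFB G)
          (-1, List.replicate G.length false)).1 = (c : Int) ∧
        ∀ i, pvMk ((PySem.List.pyRange 0 (m : Int) 1).foldl (pvFB G)
          (-1, List.replicate G.length false)).2 i →
          (pvReach G c i ∨ ¬ pvReach G i c))) := by
  intro m
  induction m with
  | zero =>
    intro _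
    rw [show ((0 : Nat) : Int) = 0 from rfl, show PySem.List.pyRange 0 0 1 = [] from rfl]
    simp only [List.foldl_nil]
    refine ⟨by simp, fun i j hi _ => absurd hi (pvMkRepF _ i),
      fun i hi => absurd hi (by omega), Or.inl ⟨?_, fun i => pvMkRepF _ i⟩⟩
    trivial
  | succ m ihm =>
    intro hm
    obtain ⟨fLen, fCl, fBelow, fDisj⟩ := ihm (by omega)
    have hcast : ((m + 1 : Nat) : Int) = (m : Int) + 1 := by push_cast; ring
    rw [hcast, PySem.List.pyRange_one_succ_right (by positivity), List.foldl_append,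
      List.foldl_cons, List.foldl_nil]
    set sB := (PySem.List.pyRange 0 (m : Int) 1).foldl (pvFB G)
      (-1, List.replicate G.length false) with hsB
    have hmlt : m < G.length := by omega
    by_cases hg : PySem.List.pyGetD sB.2 (m : Int) true = false
    · have hstep : pvFB G sB (m : Int) = ((m : Int), reachB G (G.length + 1) (m : Int) sB.2) := by
        simp [pvFB, hg]
      rw [hstep]
      obtain ⟨hrr, hk, hslot⟩ := pvGuard sB.2 (m : Int) hg
      have hIdxm : pvIdx sB.2.length (m : Int) = m := by
        rw [fLen]; exact pvIdx_natCast G.length m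
      refine ⟨by rw [reachB_len]; exact fLen, reachB_closed G (m : Int) sB.2 fLen fCl, ?_,
        Or.inr ⟨m, hmlt, rfl, ?_⟩⟩
      · intro i hi
        rcases Nat.lt_succ_iff_lt_or_eq.mp hi with hi' | hi'
        · exact reachB_mono G _ (m : Int) sB.2 i (fBelow i hi')
        · have := reachB_self G (G.length + 1) (m : Int) sB.2 (by omega) hg
          rw [hIdxm] at this
          rw [hi']
          exact this
      · intro i hi
        rcases reachB_sound G (G.length + 1) (m : Int) sB.2 fLen i hi with h1 | ⟨-, h2⟩
        · refine Or.inr ?_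
          intro hri
          have := pvReach_closed G sB.2 fCl i m h1 hri
          rw [pvMk, ← hIdxm] at this
          rw [hslot] at this
          simp at this
        · rw [pvIdx_natCast] at h2
          exact Or.inl h2
    · have hg' : PySem.List.pyGetD sB.2 (m : Int) true = true := by
        cases hx : PySem.List.pyGetD sB.2 (m : Int) true
        · exact absurd hx hg
        · rfl
      have hstep : pvFB G sB (m : Int) = sB := by simp [pvFB, hg']
      rw [hstep]
      have hmkm : pvMk sB.2 m := by
        have h1 : -(sB.2.length : Int) ≤ (m : Int) := by rw [fLen]; omega
        have h2 : (m : Int) < sB.2.length := by rw [fLen]; exact_mod_cast hmlt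
        have := pvGuardT sB.2 (m : Int) h1 h2 hg'
        rwa [fLen, pvIdx_natCast] at this
      refine ⟨fLen, fCl, ?_, ?_⟩
      · intro i hi
        rcases Nat.lt_succ_iff_lt_or_eq.mp hi with hi' | hi'
        · exact fBelow i hi'
        · subst hi'; exact hmkm
      · rcases fDisj with ⟨-, hno⟩ | hR
        · exact absurd hmkm (hno m)
        · exact Or.inr hR

-- ===== VERDICT (by name: the statement is the Claim_ definition above) =====
theorem goodBeginning_spec : Claim_equal_goodBeginning := by
  unfold Claim_equal_goodBeginning
  intro G _ hPre
  unfold Spec_goodBeginning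
  obtain ⟨hne, hrange⟩ := hPre
  have hn : 0 < G.length := List.length_pos_iff.mpr hne
  have hPreR : ∀ i, ∀ v ∈ G.getD i [], pvInR G.length v := by
    intro i v hv
    rw [List.getD_eq_getElem?_getD] at hv
    rcases h : G[i]? with _ | row
    · rw [h] at hv; simp at hv
    · rw [h] at hv
      simp only [Option.getD_some] at hv
      have hrow : row ∈ G := by
        rw [List.getElem?_eq_some_iff] at h
        obtain ⟨hlt, hEq⟩ := h
        exact hEq ▸ List.getElem_mem _
      exact hrange row hrow v hv
  have hQ := pvForest G G.length le_rfl
  rw [goodBeginning_eq]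
  simp only
  set sA := (PySem.List.pyRange 0 (G.length : Int) 1).foldl (pvFA G)
    (1, List.replicate G.length (-1), List.replicate G.length false) with hsA
  set sB := (PySem.List.pyRange 0 (G.length : Int) 1).foldl (pvFB G)
    (-1, List.replicate G.length false) with hsB
  obtain ⟨hEq, hL2, hL1, hT, hVis, hDisj⟩ := hQ
  rcases hDisj with ⟨h1, -⟩ | ⟨rI, hrI, hBr, hRoot, hOth⟩
  · exfalso
    have := hVis 0 hn
    rw [h1, List.getElem?_replicate, if_pos hn] at this
    simp at this
  · have htc : pvTC sA.2.2 = G.length := by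
      have := pvTC_full sA.2.2 (by rw [hL2]; exact hVis)
      omega
    have hTime : sA.1 = 1 + (G.length : Int) := by rw [hT, htc]
    have hRoot' : sA.2.1[rI]? = some ((G.length : Int)) := by
      rw [hRoot, hTime]
      congr 1
      ring
    have hIdx : PySem.List.index? sA.2.1 ((G.length : Int)) = some rI := by
      apply pvIdxOf_unique _ _ _ hRoot'
      intro j hj
      by_cases hjn : j < G.length
      · obtain ⟨x, hx1, hx2⟩ := hOth j hj (hVis j hjn)
        rw [hx1, hTime] at *
        intro hcon
        have : x = (G.length : Int) := by simpa using hcon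
        omega
      · rw [List.getElem?_eq_none_iff.mpr (by omega)]
        simp
    rw [hIdx]
    simp only
    rw [pvReset G.length (-1 : Int) sA.2.1 hL1, pvReset G.length false sA.2.2 hL2]
    have hguard : PySem.List.pyGetD (List.replicate G.length false) ((rI : Nat) : Int) true
        = false := by
      rw [PySem.List.pyGetD_natCast, List.getD_eq_getElem?_getD, List.getElem?_replicate,
        if_pos hrI]
      rfl
    rw [pvTrav G (G.length + 1) ((rI : Nat) : Int) sA.1 _ _ hguard, pvScanAll]
    -- goal: (reachB …).all = goodBeginning_alt G
    set RA := reachB G (G.length + 1) ((rI : Nat) : Int) (List.replicate G.length false)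
      with hRA
    have hRepLen : (List.replicate G.length false).length = G.length := List.length_replicate
    have hRAlen : RA.length = G.length := by rw [hRA, reachB_len, hRepLen]
    have hEmpCl : ∀ i j, pvMk (List.replicate G.length false) i → pvEdge G i j →
        pvMk (List.replicate G.length false) j := fun i j hi _ => absurd hi (pvMkRepF _ i)
    have hRAcl := reachB_closed G ((rI : Nat) : Int) _ hRepLen hEmpCl
    have hRAself : pvMk RA rI := by
      have := reachB_self G (G.length + 1) ((rI : Nat) : Int)
        (List.replicate G.length false) (by omega) hguard
      rwa [hRepLen, pvIdx_natCast] at this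
    have hRAiff : ∀ i, pvMk RA i ↔ pvReach G rI i := by
      intro i
      constructor
      · intro h
        rcases reachB_sound G (G.length + 1) _ _ hRepLen i h with h1 | ⟨-, h2⟩
        · exact absurd h1 (pvMkRepF _ i)
        · rwa [pvIdx_natCast] at h2
      · intro h
        exact pvReach_closed G RA hRAcl rI i hRAself h
    have hAiff : (RA.all (fun b => b) = true) ↔ ∀ i < G.length, pvReach G rI i := by
      rw [pvAll_iff, hRAlen]
      constructor
      · intro h i hi; exact (hRAiff i).mp (h i hi)
      · intro h i hi; exact (hRAiff i).mpr (h i hi)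
    -- characterization of B
    have hSchar : ∀ k : Nat, k < G.length →
        (((bfsLoop G (G.length + 1) [((k : Nat) : Int)]
            (List.replicate G.length false)).all (fun b => b) = true) ↔
          ∀ i < G.length, pvReach G k i) := by
      intro k hk
      have hfr : ∀ x ∈ [((k : Nat) : Int)], pvInR G.length x := by
        intro x hx
        rw [List.mem_singleton] at hx
        subst hx
        exact ⟨by omega, by exact_mod_cast hk⟩
      have hH : ∀ i, pvMk (List.replicate G.length false) i → ∀ v ∈ G.getD i [],
          v ∈ [((k : Nat) : Int)] ∨ pvMk (List.replicate G.length false) (pvIdx G.length v) :=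
        fun i hi => absurd hi (pvMkRepF _ i)
      obtain ⟨blen, bmono, bsound, bfront, bclosed⟩ :=
        bfsLoop_main G hPreR (G.length + 1) [((k : Nat) : Int)]
          (List.replicate G.length false) hRepLen (by rw [pvTCRep0]; omega) hfr hH
      have hfrontk : pvMk (bfsLoop G (G.length + 1) [((k : Nat) : Int)]
          (List.replicate G.length false)) k := by
        have := bfront ((k : Nat) : Int) (List.mem_singleton_self _)
        rwa [pvIdx_natCast] at this
      rw [pvAll_iff, blen]
      constructor
      · intro h i hi
        rcases bsound i (h i hi) with h1 | ⟨x, hx, hre⟩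
        · exact absurd h1 (pvMkRepF _ i)
        · rw [List.mem_singleton] at hx
          subst hx
          rwa [pvIdx_natCast] at hre
      · intro h i hi
        exact pvReach_closed G _ bclosed k i hfrontk (h i hi)
    have hBchar : (goodBeginning_alt G = true) ↔
        ∃ k : Nat, k < G.length ∧ ∀ i < G.length, pvReach G k i := by
      unfold goodBeginning_alt
      rw [bruteLoop_iff]
      constructor
      · rintro ⟨u, hu, hall⟩
        obtain ⟨k, hk, rfl⟩ := (mem_pyRange_iff G.length u).mp hu
        exact ⟨k, hk, (hSchar k hk).mp hall⟩
      · rintro ⟨k, hk, hm⟩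
        exact ⟨((k : Nat) : Int), (mem_pyRange_iff G.length _).mpr ⟨k, hk, rfl⟩,
          (hSchar k hk).mpr hm⟩
    -- the mother-vertex theorem: connect the two characterizations via the forest invariant
    have hFR := pvForestReach G hPreR G.length le_rfl
    rw [← hsB] at hFR
    obtain ⟨fLen, fCl, fBelow, fDisj⟩ := hFR
    have hbridge : (∀ i < G.length, pvReach G rI i) ↔
        (∃ k : Nat, k < G.length ∧ ∀ i < G.length, pvReach G k i) := by
      constructor
      · intro h
        exact ⟨rI, hrI, h⟩
      · rintro ⟨k, hk, hm⟩
        rcases fDisj with ⟨-, hno⟩ | ⟨c, hc, hc1, hcprop⟩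
        · exact absurd (fBelow 0 hn) (hno 0)
        · have hcr : c = rI := by
            rw [hc1] at hBr
            exact_mod_cast hBr
          subst hcr
          intro i hi
          rcases hcprop k (fBelow k hk) with h1 | h1
          · exact Relation.ReflTransGen.trans h1 (hm i hi)
          · exact absurd (hm c hrI) h1
    have hbool : ∀ a b : Bool, (a = true ↔ b = true) → a = b := by decide
    exact hbool _ _ (by rw [hAiff, hBchar]; exact hbridge)
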